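-- pv_equiv track=rewrite | github.com/BangSungjoon/Algorithm_Study | bhs/week55/258712/sol1.py | solution
-- ===== SOURCE A (Python) =====
-- def solution(friends, gifts):
--
--     name_table = {}
--     for i, friend in enumerate(friends):    # key-value(이름-숫자)
--         name_table[friend] = i
--
--     # num_gifts[i][j]: i가 j에게 준 선물의 개수
--     num_gifts = [[0] * len(friends) for _ in range(len(friends))]
--
--     for gift in gifts:
--         giver, receiver = gift.split()
--         num_gifts[name_table[giver]][name_table[receiver]] += 1
--
--     # gifts_index: 선물 지수
--     gifts_index = [0] * len(friends)
--
--     transposed_num_gifts = list(zip(*num_gifts))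
--
--     for friend in friends:
--         i = name_table[friend]
--         gifts_index[i] = sum(num_gifts[i]) - sum(transposed_num_gifts[i])
--
--     #최대 선물 저장할 변수
--     max_gifts = 0
--
--     for i, receiver in enumerate(friends):
--         gifts = 0
--         for j, giver in enumerate(friends):
--             if i == j:
--                 continue
--
--             if num_gifts[i][j] > num_gifts[j][i]:
--                 gifts += 1
--             elif num_gifts[i][j] == num_gifts[j][i]:
--                 if gifts_index[i] > gifts_index[j]:
--                     gifts += 1
--         max_gifts = max(max_gifts, gifts)
--
--
--     return max_gifts
-- ===== SOURCE B (Python) =====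
-- def solution(friends, gifts):
--     idx = {f: i for i, f in enumerate(friends)}
--     n = len(friends)
--     cnt = {}
--     score = [0] * n
--     for g in gifts:
--         a, b = g.split()
--         i, j = idx[a], idx[b]
--         cnt[(i, j)] = cnt.get((i, j), 0) + 1
--         score[i] += 1
--         score[j] -= 1
--     # wins[k] starts as the number of people with a strictly smaller gift index,
--     # which is the right win count if k exchanged no gifts with anybody
--     first = {}
--     for pos, s in enumerate(sorted(score)):
--         if s not in first:
--             first[s] = pos
--     wins = [first[score[k]] for k in range(n)]
--     # fix up only the (few) pairs that actually exchanged gifts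
--     for (i, j) in cnt:
--         if i == j or (i > j and (j, i) in cnt):
--             continue
--         cij = cnt.get((i, j), 0)
--         cji = cnt.get((j, i), 0)
--         if score[i] > score[j]:
--             wins[i] -= 1
--         elif score[j] > score[i]:
--             wins[j] -= 1
--         if cij > cji:
--             wins[i] += 1
--         elif cji > cij:
--             wins[j] += 1
--         elif score[i] > score[j]:
--             wins[i] += 1
--         elif score[j] > score[i]:
--             wins[j] += 1
--     return max(wins, default=0)
-- ===== Notes on version B (the rewrite author's own statement) =====
-- stated objective: alternative
-- what changed: B abandons A's n-by-n matrix and full pairwise grid scan: it tallies pair counts and gift indices in one pass over the gifts, sorts the gift indices once so each person's initial win count is the number of strictly smaller gift indices (the correct count if no gifts were exchanged), then repairs only the unordered pairs that actually exchanged gifts, finishing with max(wins, default=0).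
import Mathlib
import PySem

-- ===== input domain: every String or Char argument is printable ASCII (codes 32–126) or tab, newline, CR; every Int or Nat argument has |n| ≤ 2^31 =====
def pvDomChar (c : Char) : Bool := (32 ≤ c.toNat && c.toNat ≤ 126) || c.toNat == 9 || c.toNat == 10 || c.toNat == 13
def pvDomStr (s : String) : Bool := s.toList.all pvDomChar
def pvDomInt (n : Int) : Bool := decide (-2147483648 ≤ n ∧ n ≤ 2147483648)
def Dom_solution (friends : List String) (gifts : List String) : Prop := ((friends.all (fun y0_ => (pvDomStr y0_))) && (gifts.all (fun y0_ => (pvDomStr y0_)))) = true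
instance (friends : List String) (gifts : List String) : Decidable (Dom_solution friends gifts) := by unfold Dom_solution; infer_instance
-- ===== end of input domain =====

-- B replaces A's n×n all-pairs grid scan by a rank-then-repair sweep: it sorts the gift
-- indices once so every person starts with the win count a gift-free world would give them,
-- then corrects only the pairs that actually exchanged gifts (objective: alternative).

-- ===== PORT A =====
-- hand port of zip(*m) for a list of Int lists (exact: truncates to the shortest row; zip() of no rows = [])
def pvZipStar (m : List (List Int)) : List (List Int) :=
  match m with
  | [] => []
  | r0 :: _ =>
      (List.range (m.foldl (fun a r => min a r.length) r0.length)).map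
        (fun j => m.map (fun r => r.getD j 0))

def solution (friends : List String) (gifts : List String) : Int :=
  let name_table := (PySem.List.enumerate friends).foldl (fun d p => d.insert p.2 p.1) PySem.Dict.empty
  let n := friends.length
  let num_gifts0 : List (List Int) := List.replicate n (List.replicate n 0)
  let num_gifts := gifts.foldl (fun m gift =>
    match PySem.Str.split₀ gift with
    | [giver, receiver] =>
        let gi := name_table.getD giver 0
        let ri := name_table.getD receiver 0
        PySem.List.pySetD m gi
          (PySem.List.pySetD (PySem.List.pyGetD m gi []) ri
            (PySem.List.pyGetD (PySem.List.pyGetD m gi []) ri 0 + 1))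
    | _ => m) num_gifts0                        -- ≠ 2 parts / unknown name: Python raises; excluded by Pre_
  let transposed := pvZipStar num_gifts
  let gifts_index0 : List Int := List.replicate n 0
  let gifts_index := friends.foldl (fun g friend =>
    let i := name_table.getD friend 0
    PySem.List.pySetD g i
      ((PySem.List.pyGetD num_gifts i []).sum - (PySem.List.pyGetD transposed i []).sum)) gifts_index0
  (PySem.List.enumerate friends).foldl (fun max_gifts p =>
    let i := p.1
    let g := (PySem.List.enumerate friends).foldl (fun acc q =>
      let j := q.1
      if i = j then acc
      else
        let a := PySem.List.pyGetD (PySem.List.pyGetD num_gifts i []) j 0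
        let b := PySem.List.pyGetD (PySem.List.pyGetD num_gifts j []) i 0
        if a > b then acc + 1
        else if a = b then
          (if PySem.List.pyGetD gifts_index i 0 > PySem.List.pyGetD gifts_index j 0 then acc + 1 else acc)
        else acc) 0
    max max_gifts g) 0

-- ===== PORT B =====
def solution_alt (friends : List String) (gifts : List String) : Int :=
  let idx := (PySem.List.enumerate friends).foldl (fun d p => d.insert p.2 p.1) PySem.Dict.empty
  let n := friends.length
  let st := gifts.foldl
    (fun (st : PySem.Dict (Int × Int) Int × List Int) g =>
      let parts := PySem.Str.split₀ g
      if parts.length = 2 then                 -- 'a, b = g.split()': exactly two parts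
        let a := parts.getD 0 ""
        let b := parts.getD 1 ""
        let i := idx.getD a 0
        let j := idx.getD b 0
        (st.1.insert (i, j) (st.1.getD (i, j) 0 + 1),
         let s1 := PySem.List.pySetD st.2 i (PySem.List.pyGetD st.2 i 0 + 1)
         PySem.List.pySetD s1 j (PySem.List.pyGetD s1 j 0 - 1))
      else st)                                 -- ≠ 2 parts / unknown name: Python raises; excluded by Pre_
    (PySem.Dict.empty, List.replicate friends.length (0 : Int))
  let cnt := st.1
  let score := st.2
  let first := (PySem.List.enumerate (PySem.List.sorted score (fun x => x) false)).foldl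
    (fun (d : PySem.Dict Int Int) p => if d.contains p.2 then d else d.insert p.2 p.1)
    PySem.Dict.empty
  -- first[score[k]]: score[k] is always a key of first, so getD is exact here
  let wins0 := (PySem.List.pyRange 0 (n : Int)).map
    (fun k => first.getD (PySem.List.pyGetD score k 0) 0)
  let wins := cnt.keys.foldl (fun w p =>
    if p.1 = p.2 ∨ (p.2 < p.1 ∧ cnt.contains (p.2, p.1) = true) then w
    else
      let cij := cnt.getD (p.1, p.2) 0
      let cji := cnt.getD (p.2, p.1) 0
      let si := PySem.List.pyGetD score p.1 0
      let sj := PySem.List.pyGetD score p.2 0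
      let w1 := if si > sj then PySem.List.pySetD w p.1 (PySem.List.pyGetD w p.1 0 - 1)
        else if sj > si then PySem.List.pySetD w p.2 (PySem.List.pyGetD w p.2 0 - 1)
        else w
      if cij > cji then PySem.List.pySetD w1 p.1 (PySem.List.pyGetD w1 p.1 0 + 1)
      else if cji > cij then PySem.List.pySetD w1 p.2 (PySem.List.pyGetD w1 p.2 0 + 1)
      else if si > sj then PySem.List.pySetD w1 p.1 (PySem.List.pyGetD w1 p.1 0 + 1)
      else if sj > si then PySem.List.pySetD w1 p.2 (PySem.List.pyGetD w1 p.2 0 + 1)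
      else w1) wins0
  PySem.List.maxD wins (fun x => x) 0

-- ===== PRECONDITION & SPEC =====
-- Pre_ excludes exactly the inputs where Python A raises: a gift line that does not split into
-- exactly two whitespace-separated tokens (ValueError) or names a person not in friends (KeyError).
def Pre_solution (friends : List String) (gifts : List String) : Prop :=
  ∀ g ∈ gifts, (PySem.Str.split₀ g).length = 2 ∧ ∀ p ∈ PySem.Str.split₀ g, p ∈ friends
instance (friends : List String) (gifts : List String) : Decidable (Pre_solution friends gifts) := by
  unfold Pre_solution; infer_instance
def pvWitness_solution : List String × List String := (["muzi", "frodo"], ["muzi frodo", "frodo muzi", "muzi frodo"])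

def Spec_solution (friends : List String) (gifts : List String) (out : Int) : Prop := out = solution_alt friends gifts
instance (friends : List String) (gifts : List String) (out : Int) : Decidable (Spec_solution friends gifts out) := by unfold Spec_solution; infer_instance

-- ===== CLAIM (what is proved, stated in full; the proofs are below) =====
def Claim_equal_solution : Prop := ∀ (friends : List String) (gifts : List String), Dom_solution friends gifts → Pre_solution friends gifts → Spec_solution friends gifts (solution friends gifts)

-- ===== LEMMAS AND PROOFS =====

-- proof-side vocabulary: name table, parsed gift list, pair counts, gift index, win relation, win count
def pvNT (friends : List String) : PySem.Dict String Int :=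
  (PySem.List.enumerate friends).foldl (fun d p => d.insert p.2 p.1) PySem.Dict.empty
def pvPr (nt : PySem.Dict String Int) (g : String) : Int × Int :=
  match PySem.Str.split₀ g with
  | [a, b] => (nt.getD a 0, nt.getD b 0)
  | _ => (0, 0)

def pvL (friends gifts : List String) : List (Int × Int) := gifts.map (pvPr (pvNT friends))

def pvC (friends gifts : List String) (i j : Int) : Int := ((pvL friends gifts).count (i, j) : Int)

def pvS (friends gifts : List String) (i : Int) : Int :=
  (((pvL friends gifts).map Prod.fst).count i : Int) - (((pvL friends gifts).map Prod.snd).count i : Int)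

def pvW (friends gifts : List String) (i j : Int) : Bool :=
  decide (pvC friends gifts i j > pvC friends gifts j i) ||
  (decide (pvC friends gifts i j = pvC friends gifts j i) && decide (pvS friends gifts i > pvS friends gifts j))

def pvCnt (friends gifts : List String) (i : Int) : Int :=
  (((PySem.List.pyRange 0 (friends.length : Int)).countP
      (fun j => decide (j ≠ i) && pvW friends gifts i j)) : Int)

lemma foldl_enumerate_fst {α β : Type} (xs : List α) (G : β → Int → β) (init : β) :
    (PySem.List.enumerate xs).foldl (fun acc p => G acc p.1) init
      = (PySem.List.pyRange 0 (xs.length : Int)).foldl G init := by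
  have h := PySem.List.map_fst_enumerate xs 0
  rw [zero_add] at h
  rw [← h, List.foldl_map]

lemma branch_eq (cij cji si sj acc : Int) (i j : Int) :
    (if i = j then acc
     else if cij > cji then acc + 1
     else if cij = cji then (if si > sj then acc + 1 else acc) else acc)
    = if (decide (j ≠ i) && (decide (cij > cji) || (decide (cij = cji) && decide (si > sj)))) = true
      then acc + 1 else acc := by
  by_cases hij : i = j
  · simp [hij]
  · have hji : (j ≠ i) := fun h => hij h.symm
    simp only [if_neg hij, hji, decide_true, Bool.true_and, Bool.or_eq_true, Bool.and_eq_true,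
      decide_eq_true_eq]
    split_ifs <;> first | rfl | omega

lemma pvSplit2 (g : String) (h2 : (PySem.Str.split₀ g).length = 2) :
    ∃ a b, PySem.Str.split₀ g = [a, b] := by
  rcases h : PySem.Str.split₀ g with _ | ⟨a, _ | ⟨b, _ | _⟩⟩ <;> rw [h] at h2 <;> simp_all

lemma pyGetD_replicate0 (n : Nat) (i : Int) (hi : 0 ≤ i) :
    PySem.List.pyGetD (List.replicate n (0 : Int)) i 0 = 0 := by
  rw [PySem.List.pyGetD_of_nonneg _ _ hi]
  by_cases h : i.toNat < n
  · rw [List.getD_eq_getElem _ _ (by simpa using h)]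
    simp
  · rw [List.getD_eq_default _ _ (by simpa using h)]

lemma pyGetD2_replicate0 (n N : Nat) (i j : Int) (hi : 0 ≤ i) (hj : 0 ≤ j) :
    PySem.List.pyGetD (PySem.List.pyGetD (List.replicate n (List.replicate N (0 : Int))) i []) j 0 = 0 := by
  rw [PySem.List.pyGetD_of_nonneg _ _ hi]
  by_cases h : i.toNat < n
  · rw [List.getD_eq_getElem _ _ (by simpa using h), List.getElem_replicate]
    exact pyGetD_replicate0 N j hj
  · rw [List.getD_eq_default _ _ (by simpa using h)]
    rw [PySem.List.pyGetD_of_nonneg _ _ hj]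
    rfl

lemma pyGetD_pySetD_int {α : Type} (xs : List α) {i k : Int} (v d : α)
    (h0 : 0 ≤ i) (h1 : i < (xs.length : Int)) (hk : 0 ≤ k) :
    PySem.List.pyGetD (PySem.List.pySetD xs i v) k d = if k = i then v else PySem.List.pyGetD xs k d := by
  have hi : i = ((i.toNat : Nat) : Int) := by omega
  have hkk : k = ((k.toNat : Nat) : Int) := by omega
  rw [hi, hkk, PySem.List.pyGetD_pySetD_natCast xs i.toNat k.toNat v d (by omega)]
  by_cases h : k.toNat = i.toNat
  · rw [if_pos h, if_pos (by omega)]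
  · rw [if_neg h, if_neg (by omega)]

def pvStepM (m : List (List Int)) (p : Int × Int) : List (List Int) :=
  PySem.List.pySetD m p.1
    (PySem.List.pySetD (PySem.List.pyGetD m p.1 []) p.2
      (PySem.List.pyGetD (PySem.List.pyGetD m p.1 []) p.2 0 + 1))

lemma pvFoldM_char (N : Nat) : ∀ (l : List (Int × Int)) (m : List (List Int)),
    (∀ r ∈ m, r.length = N) →
    (∀ p ∈ l, 0 ≤ p.1 ∧ p.1 < (m.length : Int) ∧ 0 ≤ p.2 ∧ p.2 < (N : Int)) →
    (l.foldl pvStepM m).length = m.length ∧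
    (∀ r ∈ l.foldl pvStepM m, r.length = N) ∧
    (∀ i j : Int, 0 ≤ i → 0 ≤ j →
      PySem.List.pyGetD (PySem.List.pyGetD (l.foldl pvStepM m) i []) j 0
        = PySem.List.pyGetD (PySem.List.pyGetD m i []) j 0 + (l.count (i, j) : Int)) := by
  intro l
  induction l with
  | nil => intro m hm _; simpa using hm
  | cons p t ih =>
    intro m hm hl
    obtain ⟨hp1, hp2, hp3, hp4⟩ := hl p (by simp)
    -- facts about one step
    have hrowlen : (PySem.List.pyGetD m p.1 []).length = N := by
      rw [PySem.List.pyGetD_of_nonneg _ _ hp1]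
      have : p.1.toNat < m.length := by omega
      rw [List.getD_eq_getElem _ _ this]
      exact hm _ (List.getElem_mem this)
    have hslen : ∀ v : List Int, (PySem.List.pySetD m p.1 v).length = m.length :=
      fun v => PySem.List.length_pySetD ..
    have hsmem : ∀ r ∈ pvStepM m p, r.length = N := by
      intro r hr
      unfold pvStepM at hr
      rw [PySem.List.pySetD_of_nonneg _ _ hp1] at hr
      rcases List.mem_or_eq_of_mem_set hr with h | h
      · exact hm r h
      · subst h; rw [PySem.List.length_pySetD, hrowlen]
    have hstep : ∀ i j : Int, 0 ≤ i → 0 ≤ j →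
        PySem.List.pyGetD (PySem.List.pyGetD (pvStepM m p) i []) j 0
          = PySem.List.pyGetD (PySem.List.pyGetD m i []) j 0 + (if (i, j) = p then 1 else 0) := by
      intro i j hi hj
      unfold pvStepM
      rw [pyGetD_pySetD_int m _ _ hp1 hp2 hi]
      by_cases hip : i = p.1
      · subst hip
        rw [if_pos rfl, pyGetD_pySetD_int _ _ _ hp3 (by rw [hrowlen]; exact hp4) hj]
        by_cases hjp : j = p.2
        · subst hjp
          rw [if_pos rfl, if_pos (Prod.ext rfl rfl)]
        · rw [if_neg hjp, if_neg (by simp [Prod.ext_iff, hjp])]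
          omega
      · rw [if_neg hip, if_neg (by simp [Prod.ext_iff, hip])]
        omega
    obtain ⟨ihl, ihm, ihe⟩ := ih (pvStepM m p) hsmem
      (fun q hq => by
        have := hl q (List.mem_cons_of_mem _ hq)
        unfold pvStepM
        rw [PySem.List.length_pySetD]
        exact this)
    refine ⟨?_, ihm, ?_⟩
    · rw [List.foldl_cons, ihl]; unfold pvStepM; rw [PySem.List.length_pySetD]
    · intro i j hi hj
      rw [List.foldl_cons, ihe i j hi hj, hstep i j hi hj, List.count_cons]
      push_cast
      by_cases h : (i, j) = p
      · rw [if_pos h, if_pos (by simpa using h.symm)]; ring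
      · rw [if_neg h, if_neg (by simpa using fun hc : p = (i,j) => h hc.symm)]; ring

lemma sum_map_range_ite (N m : Nat) (h : m < N) :
    ((List.range N).map (fun j : Nat => if j = m then (1:Int) else 0)).sum = 1 := by
  have hf : (fun j : Nat => if j = m then (1:Int) else 0) = fun j : Nat => if (j == m) = true then (1:Int) else 0 := by
    funext j; by_cases hj : j = m <;> simp [hj]
  rw [hf, PySem.List.sum_map_ite_one_zero]
  norm_cast
  rw [show (List.range N).countP (fun j => j == m) = (List.range N).count m from rfl, List.count_range]
  simp [h]

lemma sum_ind_fst (N : Nat) (i : Int) (p : Int × Int) (hb : p.1 = i → 0 ≤ p.2 ∧ p.2 < (N : Int)) :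
    ((List.range N).map (fun j : Nat => if (i, (j : Int)) = p then (1:Int) else 0)).sum
      = if p.1 = i then 1 else 0 := by
  by_cases hp : p.1 = i
  · obtain ⟨hb0, hb1⟩ := hb hp
    rw [if_pos hp]
    have hmap : ((List.range N).map (fun j : Nat => if (i, (j : Int)) = p then (1:Int) else 0))
        = (List.range N).map (fun j : Nat => if j = p.2.toNat then (1:Int) else 0) := by
      apply List.map_congr_left
      intro j _
      by_cases hj : j = p.2.toNat
      · rw [if_pos (by rw [Prod.ext_iff]; exact ⟨hp.symm, by subst hj; omega⟩), if_pos hj]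
      · rw [if_neg (by rw [Prod.ext_iff]; rintro ⟨-, hc⟩; exact hj (by omega)), if_neg hj]
    rw [hmap]
    exact sum_map_range_ite N p.2.toNat (by omega)
  · rw [if_neg hp]
    have hz : ∀ j : Nat, ¬ ((i, (j : Int)) = p) := fun j hc => hp (by rw [← hc])
    have : ((List.range N).map (fun j : Nat => if (i, (j : Int)) = p then (1:Int) else 0))
         = (List.range N).map (fun _ : Nat => (0:Int)) := by
      apply List.map_congr_left; intro j _; rw [if_neg (hz j)]
    rw [this]
    simp

lemma count_sum_fst (N : Nat) (i : Int) : ∀ (l : List (Int × Int)),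
    (∀ p ∈ l, p.1 = i → 0 ≤ p.2 ∧ p.2 < (N : Int)) →
    ((List.range N).map (fun j : Nat => (l.count (i, (j : Int)) : Int))).sum
      = ((l.map Prod.fst).count i : Int) := by
  intro l
  induction l with
  | nil => simp
  | cons p t ih =>
    intro h
    have ht := ih (fun q hq => h q (List.mem_cons_of_mem _ hq))
    have hstep : (fun j : Nat => (((p :: t).count (i, (j : Int))) : Int))
        = fun j : Nat => ((fun j : Nat => (t.count (i, (j : Int)) : Int)) j
            + (fun j : Nat => if (i, (j : Int)) = p then (1:Int) else 0) j) := by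
      funext j
      simp only [List.count_cons, beq_iff_eq]
      by_cases hc : (i, (j : Int)) = p
      · rw [if_pos hc.symm, if_pos hc]; push_cast; ring
      · rw [if_neg (fun hc' => hc hc'.symm), if_neg hc]; push_cast; ring
    rw [hstep, PySem.List.sum_map_add_int, ht, sum_ind_fst N i p (h p (by simp))]
    rw [List.map_cons, List.count_cons]
    by_cases hp : p.1 = i
    · rw [if_pos hp, if_pos (by simp [hp])]; push_cast; ring
    · rw [if_neg hp, if_neg (by simp; omega)]; push_cast; ring

lemma count_sum_snd (n : Nat) (k : Int) : ∀ (l : List (Int × Int)),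
    (∀ p ∈ l, p.2 = k → 0 ≤ p.1 ∧ p.1 < (n : Int)) →
    ((List.range n).map (fun a : Nat => (l.count ((a : Int), k) : Int))).sum
      = ((l.map Prod.snd).count k : Int) := by
  intro l
  induction l with
  | nil => simp
  | cons p t ih =>
    intro h
    have ht := ih (fun q hq => h q (List.mem_cons_of_mem _ hq))
    have hstep : (fun a : Nat => (((p :: t).count ((a : Int), k)) : Int))
        = fun a : Nat => ((fun a : Nat => (t.count ((a : Int), k) : Int)) a
            + (fun a : Nat => if ((a : Int), k) = p then (1:Int) else 0) a) := by
      funext a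
      simp only [List.count_cons, beq_iff_eq]
      by_cases hc : ((a : Int), k) = p
      · rw [if_pos hc.symm, if_pos hc]; push_cast; ring
      · rw [if_neg (fun hc' => hc hc'.symm), if_neg hc]; push_cast; ring
    have hind : ((List.range n).map (fun a : Nat => if ((a : Int), k) = p then (1:Int) else 0)).sum
        = if p.2 = k then 1 else 0 := by
      by_cases hp : p.2 = k
      · obtain ⟨hb0, hb1⟩ := h p (by simp) hp
        rw [if_pos hp]
        have hmap : ((List.range n).map (fun a : Nat => if ((a : Int), k) = p then (1:Int) else 0))
            = (List.range n).map (fun a : Nat => if a = p.1.toNat then (1:Int) else 0) := by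
          apply List.map_congr_left
          intro a _
          by_cases ha : a = p.1.toNat
          · rw [if_pos (by rw [Prod.ext_iff]; exact ⟨by subst ha; omega, hp.symm⟩), if_pos ha]
          · rw [if_neg (by rw [Prod.ext_iff]; rintro ⟨hc, -⟩; exact ha (by omega)), if_neg ha]
        rw [hmap]
        exact sum_map_range_ite n p.1.toNat (by omega)
      · rw [if_neg hp]
        have hz : ∀ a : Nat, ¬ (((a : Int), k) = p) := fun a hc => hp (by rw [← hc])
        have : ((List.range n).map (fun a : Nat => if ((a : Int), k) = p then (1:Int) else 0))
             = (List.range n).map (fun _ : Nat => (0:Int)) := by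
          apply List.map_congr_left; intro a _; rw [if_neg (hz a)]
        rw [this]; simp
    rw [hstep, PySem.List.sum_map_add_int, ht, hind]
    rw [List.map_cons, List.count_cons]
    by_cases hp : p.2 = k
    · rw [if_pos hp, if_pos (by simp [hp])]; push_cast; ring
    · rw [if_neg hp, if_neg (by simp; omega)]; push_cast; ring

lemma pvFoldSet_char {α : Type} (ix : String → Int) (val : Int → α) :
    ∀ (fs : List String) (g : List α), (∀ f ∈ fs, 0 ≤ ix f ∧ ix f < (g.length : Int)) →
    ∀ (i : Int) (d : α), 0 ≤ i →
      PySem.List.pyGetD (fs.foldl (fun g f => PySem.List.pySetD g (ix f) (val (ix f))) g) i d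
        = if ∃ f ∈ fs, ix f = i then val i else PySem.List.pyGetD g i d := by
  intro fs
  induction fs with
  | nil => intro g _ i d _; simp
  | cons f t ih =>
    intro g hb i d hi
    have hf := hb f (by simp)
    have hlen : (PySem.List.pySetD g (ix f) (val (ix f))).length = g.length := PySem.List.length_pySetD ..
    rw [List.foldl_cons, ih _ (fun f' hf' => by rw [hlen]; exact hb f' (List.mem_cons_of_mem _ hf')) i d hi]
    by_cases ht : ∃ f' ∈ t, ix f' = i
    · rw [if_pos ht, if_pos (by obtain ⟨f', h1, h2⟩ := ht; exact ⟨f', List.mem_cons_of_mem _ h1, h2⟩)]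
    · rw [if_neg ht, pyGetD_pySetD_int g _ _ hf.1 hf.2 hi]
      by_cases hfi : i = ix f
      · rw [if_pos hfi, if_pos ⟨f, by simp, hfi.symm⟩, hfi]
      · rw [if_neg hfi, if_neg ?_]
        rintro ⟨f', hm, hix⟩
        rcases List.mem_cons.mp hm with rfl | hm'
        · exact hfi hix.symm
        · exact ht ⟨f', hm', hix⟩

lemma foldl_max_zero_eq_maxD (xs : List Int) (h : ∀ x ∈ xs, 0 ≤ x) :
    xs.foldl max 0 = PySem.List.maxD xs (fun y => y) 0 := by
  cases xs with
  | nil => rfl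
  | cons x t =>
    unfold PySem.List.maxD
    rw [PySem.List.max?_id_cons]
    rw [List.foldl_cons, max_eq_right (h x (by simp))]
    rfl

-- name table values are indices into friends
lemma pvNT_aux (n : Int) : ∀ (l : List (Int × String)) (d : PySem.Dict String Int) (f : String),
    (∀ p ∈ l, 0 ≤ p.1 ∧ p.1 < n) →
    ((0 ≤ d.getD f 0 ∧ d.getD f 0 < n) ∨ f ∈ l.map Prod.snd) →
    0 ≤ (l.foldl (fun d p => d.insert p.2 p.1) d).getD f 0 ∧
      (l.foldl (fun d p => d.insert p.2 p.1) d).getD f 0 < n := by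
  intro l
  induction l with
  | nil => intro d f _ hd; simpa using hd.resolve_right (by simp)
  | cons p t ih =>
    intro d f hl hd
    simp only [List.foldl_cons]
    apply ih
    · exact fun q hq => hl q (List.mem_cons_of_mem _ hq)
    · by_cases hfp : f = p.2
      · left
        subst hfp
        rw [PySem.Dict.getD_insert]
        simpa using hl p (by simp)
      · rcases hd with h | h
        · left; rwa [PySem.Dict.getD_insert, if_neg hfp]
        · simp only [List.map_cons, List.mem_cons] at h
          rcases h with h | h
          · exact absurd h hfp
          · right; exact h

lemma pvNT_bound (friends : List String) : ∀ f ∈ friends,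
    0 ≤ (pvNT friends).getD f 0 ∧ (pvNT friends).getD f 0 < (friends.length : Int) := by
  intro f hf
  apply pvNT_aux (friends.length : Int) (PySem.List.enumerate friends) PySem.Dict.empty f
  · intro p hp
    rw [PySem.List.mem_enumerate_iff] at hp
    obtain ⟨k, hk, rfl⟩ := hp
    constructor <;> simp <;> omega
  · right; rw [PySem.List.map_snd_enumerate]; exact hf

-- common facts under Pre_: every parsed gift pair is a pair of valid indices
lemma pvL_valid (friends gifts : List String) (hpre : Pre_solution friends gifts) :
    ∀ p ∈ pvL friends gifts,
      0 ≤ p.1 ∧ p.1 < (friends.length : Int) ∧ 0 ≤ p.2 ∧ p.2 < (friends.length : Int) := by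
  intro p hp
  rw [pvL, List.mem_map] at hp
  obtain ⟨g, hg, rfl⟩ := hp
  obtain ⟨hlen2, hmem⟩ := hpre g hg
  obtain ⟨a, b, hab⟩ := pvSplit2 g hlen2
  have ha : a ∈ friends := hmem a (by rw [hab]; simp)
  have hb : b ∈ friends := hmem b (by rw [hab]; simp)
  rw [pvPr, hab]
  exact ⟨(pvNT_bound friends a ha).1, (pvNT_bound friends a ha).2,
         (pvNT_bound friends b hb).1, (pvNT_bound friends b hb).2⟩

-- A's value equals the max over pvCnt
lemma pvA_eq (friends gifts : List String) (hpre : Pre_solution friends gifts) :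
    solution friends gifts
      = (PySem.List.pyRange 0 (friends.length : Int)).foldl
          (fun mx i => max mx (pvCnt friends gifts i)) 0 := by
  have hnt : (PySem.List.enumerate friends).foldl (fun d p => d.insert p.2 p.1) PySem.Dict.empty
      = pvNT friends := rfl
  have hval := pvL_valid friends gifts hpre
  simp only [solution]
  rw [hnt]
  -- the matrix fold is the canonical pvStepM fold over the parsed gift list
  have hM : gifts.foldl
      (fun (m : List (List Int)) gift =>
        match PySem.Str.split₀ gift with
        | [giver, receiver] =>
            PySem.List.pySetD m ((pvNT friends).getD giver 0)
              (PySem.List.pySetD (PySem.List.pyGetD m ((pvNT friends).getD giver 0) [])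
                ((pvNT friends).getD receiver 0)
                (PySem.List.pyGetD (PySem.List.pyGetD m ((pvNT friends).getD giver 0) [])
                    ((pvNT friends).getD receiver 0) 0 + 1))
        | _ => m)
      (List.replicate friends.length (List.replicate friends.length 0))
    = (pvL friends gifts).foldl pvStepM
        (List.replicate friends.length (List.replicate friends.length 0)) := by
    rw [PySem.List.foldl_congr_mem gifts _
      (fun (m : List (List Int)) g => pvStepM m (pvPr (pvNT friends) g)) _ ?hcong]
    case hcong =>
      intro m g hg
      obtain ⟨hlen2, hmem⟩ := hpre g hg
      obtain ⟨a, b, hab⟩ := pvSplit2 g hlen2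
      simp only [hab, pvPr, pvStepM]
    rw [← List.foldl_map (f := pvPr (pvNT friends)) (g := pvStepM)]
    rfl
  rw [hM]
  set n : Int := (friends.length : Int) with hn
  set L := pvL friends gifts with hL
  set M := L.foldl pvStepM (List.replicate friends.length (List.replicate friends.length 0)) with hMdef
  obtain ⟨hMlen, hMrows, hMent⟩ := pvFoldM_char friends.length L
    (List.replicate friends.length (List.replicate friends.length 0))
    (fun r hr => by rw [List.eq_of_mem_replicate hr]; simp)
    (fun p hp => by
      have := hval p hp
      simp only [List.length_replicate]
      exact this)
  rw [List.length_replicate] at hMlen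
  rw [← hMdef] at hMlen hMrows hMent
  have hE : ∀ i j : Int, 0 ≤ i → 0 ≤ j →
      PySem.List.pyGetD (PySem.List.pyGetD M i []) j 0 = pvC friends gifts i j := by
    intro i j hi hj
    rw [hMdef, hMent i j hi hj, pyGetD2_replicate0 _ _ _ _ hi hj, zero_add, pvC, hL]
  -- row i of the final matrix, reconstructed
  have hrow : ∀ i : Int, 0 ≤ i → i < n →
      PySem.List.pyGetD M i []
        = (List.range friends.length).map (fun j : Nat => pvC friends gifts i (j : Int)) := by
    intro i h0 h1
    have hiN : i.toNat < M.length := by omega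
    have hgetM : PySem.List.pyGetD M i [] = M[i.toNat] := by
      rw [PySem.List.pyGetD_of_nonneg _ _ h0, List.getD_eq_getElem _ _ hiN]
    have hlenrow : (PySem.List.pyGetD M i []).length = friends.length := by
      rw [hgetM]; exact hMrows _ (List.getElem_mem hiN)
    apply List.ext_getElem
    · simp [hlenrow]
    · intro m hm1 hm2
      rw [List.getElem_map, List.getElem_range]
      rw [← List.getD_eq_getElem _ 0 hm1, ← PySem.List.pyGetD_natCast]
      exact hE i (m : Int) h0 (by omega)
  have hrowsum : ∀ i : Int, 0 ≤ i → i < n →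
      (PySem.List.pyGetD M i []).sum = ((L.map Prod.fst).count i : Int) := by
    intro i h0 h1
    rw [hrow i h0 h1]
    exact count_sum_fst friends.length i L (fun p hp _ => ⟨(hval p hp).2.2.1, (hval p hp).2.2.2⟩)
  -- column i of the final matrix via the zip(*) transpose
  have hcolsum : ∀ i : Int, 0 ≤ i → i < n →
      (PySem.List.pyGetD (pvZipStar M) i []).sum = ((L.map Prod.snd).count i : Int) := by
    intro i h0 h1
    have hpos : 0 < friends.length := by omega
    obtain ⟨r0, rest, hM0⟩ : ∃ r0 rest, M = r0 :: rest := by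
      rcases hMM : M with _ | ⟨r0, rest⟩
      · rw [hMM] at hMlen; simp at hMlen; omega
      · exact ⟨r0, rest, rfl⟩
    have hr0 : r0.length = friends.length := hMrows r0 (by rw [hM0]; simp)
    have hmin : M.foldl (fun a r => min a r.length) r0.length = friends.length := by
      rw [← hr0]
      have : ∀ (m : List (List Int)) (N : Nat), (∀ r ∈ m, r.length = N) →
          m.foldl (fun a r => min a r.length) N = N := by
        intro m
        induction m with
        | nil => intro N _; rfl
        | cons r t ih =>
          intro N hmem
          rw [List.foldl_cons, hmem r (by simp), min_self]
          exact ih N (fun r' hr' => hmem r' (List.mem_cons_of_mem _ hr'))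
      rw [hr0]
      exact this M friends.length hMrows
    have hT : pvZipStar M = (List.range friends.length).map
        (fun j => M.map (fun r => r.getD j 0)) := by
      rw [hM0]
      show (List.range ((r0 :: rest).foldl (fun a r => min a r.length) r0.length)).map _ = _
      rw [← hM0, hmin]
    rw [hT, PySem.List.pyGetD_of_nonneg _ _ h0,
        List.getD_eq_getElem _ _ (by simp; omega), List.getElem_map, List.getElem_range]
    have hcol : M.map (fun r => r.getD i.toNat 0)
        = (List.range friends.length).map (fun a : Nat => pvC friends gifts (a : Int) i) := by
      apply List.ext_getElem
      · simp [hMlen]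
      · intro m hm1 hm2
        rw [List.getElem_map, List.getElem_map, List.getElem_range]
        have hmM : m < M.length := by simpa [hMlen] using hm1
        have : M[m].getD i.toNat 0 = PySem.List.pyGetD (PySem.List.pyGetD M (m : Int) []) i 0 := by
          rw [PySem.List.pyGetD_natCast M m [], List.getD_eq_getElem _ _ hmM,
              PySem.List.pyGetD_of_nonneg _ _ h0]
        rw [this]
        exact hE (m : Int) i (by omega) h0
    rw [hcol]
    exact count_sum_snd friends.length i L (fun p hp _ => ⟨(hval p hp).1, (hval p hp).2.1⟩)
  -- the gift-index vector
  have hGI := pvFoldSet_char (fun f => (pvNT friends).getD f 0)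
    (fun i => (PySem.List.pyGetD M i []).sum - (PySem.List.pyGetD (pvZipStar M) i []).sum)
    friends (List.replicate friends.length (0 : Int))
    (fun f hf => by
      simp only [List.length_replicate]
      exact pvNT_bound friends f hf)
  beta_reduce at hGI
  have hS : ∀ i : Int, 0 ≤ i → i < n →
      PySem.List.pyGetD (friends.foldl
        (fun g f => PySem.List.pySetD g ((pvNT friends).getD f 0)
          ((PySem.List.pyGetD M ((pvNT friends).getD f 0) []).sum
            - (PySem.List.pyGetD (pvZipStar M) ((pvNT friends).getD f 0) []).sum))
        (List.replicate friends.length (0 : Int))) i 0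
        = pvS friends gifts i := by
    intro i h0 h1
    rw [hGI i 0 h0]
    by_cases himg : ∃ f ∈ friends, (pvNT friends).getD f 0 = i
    · rw [if_pos himg, hrowsum i h0 h1, hcolsum i h0 h1, pvS, hL]
    · rw [if_neg himg, pyGetD_replicate0 _ _ h0]
      have hz : (L.map Prod.fst).count i = 0 ∧ (L.map Prod.snd).count i = 0 := by
        constructor <;> rw [List.count_eq_zero] <;> intro hmem
        · obtain ⟨p, hp, hp1⟩ := List.mem_map.mp hmem
          rw [hL, pvL, List.mem_map] at hp
          obtain ⟨g, hg, rfl⟩ := hp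
          obtain ⟨hlen2, hmem2⟩ := hpre g hg
          obtain ⟨a, b, hab⟩ := pvSplit2 g hlen2
          rw [pvPr, hab] at hp1
          exact himg ⟨a, hmem2 a (by rw [hab]; simp), hp1⟩
        · obtain ⟨p, hp, hp1⟩ := List.mem_map.mp hmem
          rw [hL, pvL, List.mem_map] at hp
          obtain ⟨g, hg, rfl⟩ := hp
          obtain ⟨hlen2, hmem2⟩ := hpre g hg
          obtain ⟨a, b, hab⟩ := pvSplit2 g hlen2
          rw [pvPr, hab] at hp1
          exact himg ⟨b, hmem2 b (by rw [hab]; simp), hp1⟩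
      rw [pvS, ← hL, hz.1, hz.2]
      simp
  set GIv := friends.foldl
      (fun g f => PySem.List.pySetD g ((pvNT friends).getD f 0)
        ((PySem.List.pyGetD M ((pvNT friends).getD f 0) []).sum
          - (PySem.List.pyGetD (pvZipStar M) ((pvNT friends).getD f 0) []).sum))
      (List.replicate friends.length (0 : Int)) with hGIdef
  rw [foldl_enumerate_fst friends (fun mx i => max mx ((PySem.List.enumerate friends).foldl
      (fun acc q =>
        if i = q.1 then acc
        else if PySem.List.pyGetD (PySem.List.pyGetD M i []) q.1 0
            > PySem.List.pyGetD (PySem.List.pyGetD M q.1 []) i 0 then acc + 1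
        else if PySem.List.pyGetD (PySem.List.pyGetD M i []) q.1 0
            = PySem.List.pyGetD (PySem.List.pyGetD M q.1 []) i 0 then
          (if PySem.List.pyGetD GIv i 0 > PySem.List.pyGetD GIv q.1 0 then acc + 1 else acc)
        else acc) 0)) 0]
  rw [PySem.List.foldl_congr_mem (PySem.List.pyRange 0 (friends.length : Int)) _
    (fun mx i => max mx (pvCnt friends gifts i)) 0 ?hout]
  case hout =>
    intro mx i hi
    rw [PySem.List.mem_pyRange_one] at hi
    congr 1
    rw [foldl_enumerate_fst friends (fun acc j =>
        if i = j then acc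
        else if PySem.List.pyGetD (PySem.List.pyGetD M i []) j 0
            > PySem.List.pyGetD (PySem.List.pyGetD M j []) i 0 then acc + 1
        else if PySem.List.pyGetD (PySem.List.pyGetD M i []) j 0
            = PySem.List.pyGetD (PySem.List.pyGetD M j []) i 0 then
          (if PySem.List.pyGetD GIv i 0 > PySem.List.pyGetD GIv j 0 then acc + 1 else acc)
        else acc) 0]
    rw [PySem.List.foldl_congr_mem (PySem.List.pyRange 0 (friends.length : Int)) _
      (fun acc j => if (decide (j ≠ i) && pvW friends gifts i j) = true then acc + 1 else acc)
      0 ?hin]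
    case hin =>
      intro acc j hj
      rw [PySem.List.mem_pyRange_one] at hj
      rw [hE i j (by omega) (by omega), hE j i (by omega) (by omega),
          hS i (by omega) (by omega), hS j (by omega) (by omega)]
      unfold pvW
      exact branch_eq _ _ _ _ acc i j
    rw [PySem.List.foldl_count_if, zero_add]
    rfl

-- ===== B-side: score fold, rank dictionary, pair-repair sweep =====

-- one gift updates the giver's and receiver's gift index
def pvStepS (v : List Int) (p : Int × Int) : List Int :=
  let s1 := PySem.List.pySetD v p.1 (PySem.List.pyGetD v p.1 0 + 1)
  PySem.List.pySetD s1 p.2 (PySem.List.pyGetD s1 p.2 0 - 1)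

lemma pvFoldS_char : ∀ (l : List (Int × Int)) (v : List Int),
    (∀ p ∈ l, 0 ≤ p.1 ∧ p.1 < (v.length : Int) ∧ 0 ≤ p.2 ∧ p.2 < (v.length : Int)) →
    (l.foldl pvStepS v).length = v.length ∧
    ∀ k : Int, 0 ≤ k →
      PySem.List.pyGetD (l.foldl pvStepS v) k 0
        = PySem.List.pyGetD v k 0 + ((l.map Prod.fst).count k : Int) - ((l.map Prod.snd).count k : Int) := by
  intro l
  induction l with
  | nil => intro v _; simp
  | cons p t ih =>
    intro v hb
    obtain ⟨h1, h2, h3, h4⟩ := hb p (by simp)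
    have hl1 : (PySem.List.pySetD v p.1 (PySem.List.pyGetD v p.1 0 + 1)).length = v.length :=
      PySem.List.length_pySetD ..
    have hlen : (pvStepS v p).length = v.length := by
      unfold pvStepS; rw [PySem.List.length_pySetD, hl1]
    have hget : ∀ k : Int, 0 ≤ k →
        PySem.List.pyGetD (pvStepS v p) k 0
          = PySem.List.pyGetD v k 0 + (if k = p.1 then 1 else 0) - (if k = p.2 then 1 else 0) := by
      intro k hk
      unfold pvStepS
      rw [pyGetD_pySetD_int _ _ _ h3 (by rw [hl1]; exact h4) hk,
          pyGetD_pySetD_int v _ _ h1 h2 h3, pyGetD_pySetD_int v _ _ h1 h2 hk]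
      split_ifs <;> simp_all
    obtain ⟨ihl, ihg⟩ := ih (pvStepS v p)
      (fun q hq => by rw [hlen]; exact hb q (List.mem_cons_of_mem _ hq))
    refine ⟨by rw [List.foldl_cons, ihl, hlen], ?_⟩
    intro k hk
    rw [List.foldl_cons, ihg k hk, hget k hk]
    simp only [List.map_cons, List.count_cons, beq_iff_eq]
    push_cast
    split_ifs <;> omega

-- the first-occurrence dictionary built over enumerate(t, s)
lemma pvFirstFold : ∀ (t : List Int) (s : Int) (d : PySem.Dict Int Int) (x dflt : Int),
    ((PySem.List.enumerate t s).foldl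
        (fun d (p : Int × Int) => if d.contains p.2 then d else d.insert p.2 p.1) d).getD x dflt
      = if d.contains x then d.getD x dflt
        else if x ∈ t then s + (t.idxOf x : Int) else dflt := by
  intro t
  induction t with
  | nil =>
    intro s d x dflt
    by_cases h : d.contains x = true
    · simp [PySem.List.enumerate_nil, h]
    · simp only [PySem.List.enumerate_nil, List.foldl_nil, h, Bool.false_eq_true, if_false,
        List.not_mem_nil, if_neg]
      exact PySem.Dict.getD_of_not_contains d dflt (by simpa using h)
  | cons a r ih =>
    intro s d x dflt
    rw [PySem.List.enumerate_cons, List.foldl_cons]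
    by_cases hda : d.contains a = true
    · show (List.foldl _ (if d.contains a = true then d else d.insert a s) _).getD x dflt = _
      rw [if_pos hda, ih (s + 1) d x dflt]
      by_cases hdx : d.contains x = true
      · rw [if_pos hdx, if_pos hdx]
      · rw [if_neg hdx, if_neg hdx]
        have hxa : x ≠ a := fun h => hdx (h ▸ hda)
        by_cases hxr : x ∈ r
        · rw [if_pos hxr, if_pos (List.mem_cons_of_mem _ hxr),
              List.idxOf_cons_ne _ (fun h => hxa h.symm)]
          push_cast; ring
        · rw [if_neg hxr, if_neg (by simp [hxa, hxr])]
    · show (List.foldl _ (if d.contains a = true then d else d.insert a s) _).getD x dflt = _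
      rw [if_neg hda, ih (s + 1) (d.insert a s) x dflt]
      by_cases hxa : x = a
      · subst hxa
        rw [if_pos (PySem.Dict.contains_insert_self d x s), PySem.Dict.getD_insert, if_pos rfl,
            if_neg (by simp [hda]), if_pos (List.mem_cons_self ..), List.idxOf_cons_self]
        simp
      · rw [PySem.Dict.contains_insert, PySem.Dict.getD_insert, if_neg hxa]
        have hbeq : (x == a) = false := by simp [hxa]
        rw [hbeq, Bool.false_or]
        by_cases hdx : d.contains x = true
        · rw [if_pos hdx, if_pos hdx]
        · rw [if_neg hdx, if_neg hdx]
          by_cases hxr : x ∈ r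
          · rw [if_pos hxr, if_pos (List.mem_cons_of_mem _ hxr),
                List.idxOf_cons_ne _ (fun h => hxa h.symm)]
            push_cast; ring
          · rw [if_neg hxr, if_neg (by simp [hxa, hxr])]

-- in a weakly sorted list, the first index of a member counts the strictly smaller elements
lemma idxOf_sorted_countP : ∀ (t : List Int), t.Pairwise (· ≤ ·) → ∀ x ∈ t,
    (t.idxOf x : Int) = (t.countP (fun y => decide (y < x)) : Int) := by
  intro t
  induction t with
  | nil => simp
  | cons a r ih =>
    intro hp x hx
    obtain ⟨ha, hr⟩ := List.pairwise_cons.mp hp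
    by_cases hax : a = x
    · subst hax
      rw [List.idxOf_cons_self]
      have h0 : (a :: r).countP (fun y => decide (y < a)) = 0 := by
        rw [List.countP_eq_zero]
        intro y hy
        rcases List.mem_cons.mp hy with rfl | hyr
        · simp
        · simpa using not_lt.mpr (ha y hyr)
      rw [h0]
    · have hxr : x ∈ r := by
        rcases List.mem_cons.mp hx with h | h
        · exact absurd h.symm hax
        · exact h
      rw [List.idxOf_cons_ne _ hax, List.countP_cons,
          if_pos (by simpa using lt_of_le_of_ne (ha x hxr) hax)]
      have := ih hr x hxr
      push_cast at this ⊢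
      omega

lemma sum_range_single (v x : Int) (hx : 0 ≤ x) (N : Nat) :
    ((List.range N).map (fun m : Nat => if (m : Int) = x then v else 0)).sum
      = if x < (N : Int) then v else 0 := by
  induction N with
  | zero =>
    simp only [List.range_zero, List.map_nil, List.sum_nil]
    rw [if_neg (by omega)]
  | succ N ih =>
    rw [List.range_succ, List.map_append, List.sum_append, ih]
    simp only [List.map_cons, List.map_nil, List.sum_cons, List.sum_nil]
    split_ifs <;> omega

lemma sum_map_sub_int {α : Type} (l : List α) (f g : α → Int) :
    (l.map (fun a => f a - g a)).sum = (l.map f).sum - (l.map g).sum := by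
  induction l with
  | nil => simp
  | cons a t ih => simp only [List.map_cons, List.sum_cons, ih]; ring

-- a sum over a duplicate-free pair list, read off coordinate-wise over range n
lemma sum_pairs_fst (n : Nat) (k : Int) (g : Int → Int) (Q : Int → Prop) [DecidablePred Q] :
    ∀ (S : List (Int × Int)), S.Nodup → (∀ p ∈ S, 0 ≤ p.2 ∧ p.2 < (n : Int)) →
    (S.map (fun p => if p.1 = k ∧ Q p.2 then g p.2 else 0)).sum
      = ((List.range n).map
          (fun m : Nat => if (k, (m : Int)) ∈ S ∧ Q (m : Int) then g (m : Int) else 0)).sum := by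
  intro S
  induction S with
  | nil => simp
  | cons p t ih =>
    intro hnd hb
    obtain ⟨hpt, hndt⟩ := List.nodup_cons.mp hnd
    rw [List.map_cons, List.sum_cons, ih hndt (fun q hq => hb q (List.mem_cons_of_mem _ hq))]
    have hsplit : ∀ m ∈ List.range n,
        (fun m : Nat => if (k, (m : Int)) ∈ p :: t ∧ Q (m : Int) then g (m : Int) else 0) m
          = (fun m : Nat => (if (k, (m : Int)) ∈ t ∧ Q (m : Int) then g (m : Int) else 0)
              + (if (k, (m : Int)) = p ∧ Q (m : Int) then g (m : Int) else 0)) m := by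
      intro m _
      by_cases h1 : (k, (m : Int)) = p
      · have h2 : ¬ ((k, (m : Int)) ∈ t) := by rw [h1]; exact hpt
        by_cases hq : Q (m : Int) <;> simp [List.mem_cons, h1, h2, hq, hpt]
      · by_cases h2 : (k, (m : Int)) ∈ t <;> by_cases hq : Q (m : Int) <;>
          simp [List.mem_cons, h1, h2, hq]
    rw [List.map_congr_left hsplit, PySem.List.sum_map_add_int]
    have hsingle : ((List.range n).map
        (fun m : Nat => if (k, (m : Int)) = p ∧ Q (m : Int) then g (m : Int) else 0)).sum
        = if p.1 = k ∧ Q p.2 then g p.2 else 0 := by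
      by_cases hc : p.1 = k ∧ Q p.2
      · have hpw : ∀ m ∈ List.range n,
            (fun m : Nat => if (k, (m : Int)) = p ∧ Q (m : Int) then g (m : Int) else 0) m
              = (fun m : Nat => if (m : Int) = p.2 then g p.2 else 0) m := by
          intro m _
          beta_reduce
          by_cases hm : (m : Int) = p.2
          · rw [if_pos hm, if_pos ⟨by rw [Prod.ext_iff]; exact ⟨hc.1.symm, hm⟩, hm ▸ hc.2⟩]
            rw [hm]
          · rw [if_neg hm, if_neg (fun h => hm (by rw [Prod.ext_iff] at h; exact h.1.2))]
        obtain ⟨hb0, hb1⟩ := hb p (by simp)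
        rw [List.map_congr_left hpw, sum_range_single (g p.2) p.2 hb0 n, if_pos hb1, if_pos hc]
      · have hpw : ∀ m ∈ List.range n,
            (fun m : Nat => if (k, (m : Int)) = p ∧ Q (m : Int) then g (m : Int) else 0) m
              = (fun _ : Nat => (0 : Int)) m := by
          intro m _
          beta_reduce
          rw [if_neg]
          rintro ⟨h1, h2⟩
          rw [Prod.ext_iff] at h1
          exact hc ⟨h1.1.symm, by rw [← h1.2]; exact h2⟩
        rw [List.map_congr_left hpw, if_neg hc]
        simp
    rw [hsingle]
    ring

lemma sum_pairs_snd (n : Nat) (k : Int) (g : Int → Int) (Q : Int → Prop) [DecidablePred Q] :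
    ∀ (S : List (Int × Int)), S.Nodup → (∀ p ∈ S, 0 ≤ p.1 ∧ p.1 < (n : Int)) →
    (S.map (fun p => if p.2 = k ∧ Q p.1 then g p.1 else 0)).sum
      = ((List.range n).map
          (fun m : Nat => if ((m : Int), k) ∈ S ∧ Q (m : Int) then g (m : Int) else 0)).sum := by
  intro S
  induction S with
  | nil => simp
  | cons p t ih =>
    intro hnd hb
    obtain ⟨hpt, hndt⟩ := List.nodup_cons.mp hnd
    rw [List.map_cons, List.sum_cons, ih hndt (fun q hq => hb q (List.mem_cons_of_mem _ hq))]
    have hsplit : ∀ m ∈ List.range n,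
        (fun m : Nat => if ((m : Int), k) ∈ p :: t ∧ Q (m : Int) then g (m : Int) else 0) m
          = (fun m : Nat => (if ((m : Int), k) ∈ t ∧ Q (m : Int) then g (m : Int) else 0)
              + (if ((m : Int), k) = p ∧ Q (m : Int) then g (m : Int) else 0)) m := by
      intro m _
      by_cases h1 : ((m : Int), k) = p
      · have h2 : ¬ (((m : Int), k) ∈ t) := by rw [h1]; exact hpt
        by_cases hq : Q (m : Int) <;> simp [List.mem_cons, h1, h2, hq, hpt]
      · by_cases h2 : ((m : Int), k) ∈ t <;> by_cases hq : Q (m : Int) <;>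
          simp [List.mem_cons, h1, h2, hq]
    rw [List.map_congr_left hsplit, PySem.List.sum_map_add_int]
    have hsingle : ((List.range n).map
        (fun m : Nat => if ((m : Int), k) = p ∧ Q (m : Int) then g (m : Int) else 0)).sum
        = if p.2 = k ∧ Q p.1 then g p.1 else 0 := by
      by_cases hc : p.2 = k ∧ Q p.1
      · have hpw : ∀ m ∈ List.range n,
            (fun m : Nat => if ((m : Int), k) = p ∧ Q (m : Int) then g (m : Int) else 0) m
              = (fun m : Nat => if (m : Int) = p.1 then g p.1 else 0) m := by
          intro m _
          beta_reduce
          by_cases hm : (m : Int) = p.1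
          · rw [if_pos hm, if_pos ⟨by rw [Prod.ext_iff]; exact ⟨hm, hc.1.symm⟩, hm ▸ hc.2⟩]
            rw [hm]
          · rw [if_neg hm, if_neg (fun h => hm (by rw [Prod.ext_iff] at h; exact h.1.1))]
        obtain ⟨hb0, hb1⟩ := hb p (by simp)
        rw [List.map_congr_left hpw, sum_range_single (g p.1) p.1 hb0 n, if_pos hb1, if_pos hc]
      · have hpw : ∀ m ∈ List.range n,
            (fun m : Nat => if ((m : Int), k) = p ∧ Q (m : Int) then g (m : Int) else 0) m
              = (fun _ : Nat => (0 : Int)) m := by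
          intro m _
          beta_reduce
          rw [if_neg]
          rintro ⟨h1, h2⟩
          rw [Prod.ext_iff] at h1
          exact hc ⟨h1.2.symm, by rw [← h1.1]; exact h2⟩
        rw [List.map_congr_left hpw, if_neg hc]
        simp
    rw [hsingle]
    ring

-- what one repaired pair adds to k's win count: actual winner indicator minus rank indicator
def pvG (friends gifts : List String) (k m : Int) : Int :=
  (if pvW friends gifts k m = true then 1 else 0)
    - (if pvS friends gifts k > pvS friends gifts m then 1 else 0)

def pvDelta (friends gifts : List String) (k : Int) (p : Int × Int) : Int :=
  if p.1 = p.2 ∨ (p.2 < p.1 ∧ 0 < pvC friends gifts p.2 p.1) then 0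
  else if k = p.1 then pvG friends gifts p.1 p.2
  else if k = p.2 then pvG friends gifts p.2 p.1
  else 0

-- the repair step of B, phrased over the abstract counts/scores
def pvFixStep (friends gifts : List String) (w : List Int) (p : Int × Int) : List Int :=
  if p.1 = p.2 ∨ (p.2 < p.1 ∧ 0 < pvC friends gifts p.2 p.1) then w
  else
    let cij := pvC friends gifts p.1 p.2
    let cji := pvC friends gifts p.2 p.1
    let si := pvS friends gifts p.1
    let sj := pvS friends gifts p.2
    let w1 := if si > sj then PySem.List.pySetD w p.1 (PySem.List.pyGetD w p.1 0 - 1)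
      else if sj > si then PySem.List.pySetD w p.2 (PySem.List.pyGetD w p.2 0 - 1)
      else w
    if cij > cji then PySem.List.pySetD w1 p.1 (PySem.List.pyGetD w1 p.1 0 + 1)
    else if cji > cij then PySem.List.pySetD w1 p.2 (PySem.List.pyGetD w1 p.2 0 + 1)
    else if si > sj then PySem.List.pySetD w1 p.1 (PySem.List.pyGetD w1 p.1 0 + 1)
    else if sj > si then PySem.List.pySetD w1 p.2 (PySem.List.pyGetD w1 p.2 0 + 1)
    else w1

lemma pySetD_shift_getD (w : List Int) (i k c : Int) (h0 : 0 ≤ i) (h1 : i < (w.length : Int))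
    (hk : 0 ≤ k) :
    PySem.List.pyGetD (PySem.List.pySetD w i (PySem.List.pyGetD w i 0 + c)) k 0
      = PySem.List.pyGetD w k 0 + (if k = i then c else 0) := by
  rw [pyGetD_pySetD_int w _ _ h0 h1 hk]
  split_ifs with h
  · rw [h]
  · ring

lemma pvFixStep_len (friends gifts : List String) (w : List Int) (p : Int × Int) :
    (pvFixStep friends gifts w p).length = w.length := by
  unfold pvFixStep
  dsimp only
  split_ifs <;> simp [PySem.List.length_pySetD]

lemma pvFixStep_getD (friends gifts : List String) (w : List Int) (p : Int × Int) (k : Int)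
    (hp1 : 0 ≤ p.1) (hp1' : p.1 < (w.length : Int))
    (hp2 : 0 ≤ p.2) (hp2' : p.2 < (w.length : Int)) (hk : 0 ≤ k) :
    PySem.List.pyGetD (pvFixStep friends gifts w p) k 0
      = PySem.List.pyGetD w k 0 + pvDelta friends gifts k p := by
  unfold pvFixStep pvDelta
  by_cases hskip : p.1 = p.2 ∨ (p.2 < p.1 ∧ 0 < pvC friends gifts p.2 p.1)
  · rw [if_pos hskip, if_pos hskip]; ring
  · rw [if_neg hskip, if_neg hskip]
    have hne : p.1 ≠ p.2 := fun h => hskip (Or.inl h)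
    have hsub1 : PySem.List.pyGetD w p.1 0 - 1 = PySem.List.pyGetD w p.1 0 + (-1) := by ring
    have hsub2 : PySem.List.pyGetD w p.2 0 - 1 = PySem.List.pyGetD w p.2 0 + (-1) := by ring
    simp only [hsub1, hsub2]
    set si := pvS friends gifts p.1 with hsi
    set sj := pvS friends gifts p.2 with hsj
    set cij := pvC friends gifts p.1 p.2 with hcij
    set cji := pvC friends gifts p.2 p.1 with hcji
    -- w1 and its bookkeeping
    have main : ∀ (w1 : List Int), w1.length = w.length →
        (∀ k : Int, 0 ≤ k →
          PySem.List.pyGetD w1 k 0 = PySem.List.pyGetD w k 0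
            + (if k = p.1 ∧ si > sj then -1 else if k = p.2 ∧ sj > si then -1 else 0)) →
        PySem.List.pyGetD
          (if cij > cji then PySem.List.pySetD w1 p.1 (PySem.List.pyGetD w1 p.1 0 + 1)
           else if cji > cij then PySem.List.pySetD w1 p.2 (PySem.List.pyGetD w1 p.2 0 + 1)
           else if si > sj then PySem.List.pySetD w1 p.1 (PySem.List.pyGetD w1 p.1 0 + 1)
           else if sj > si then PySem.List.pySetD w1 p.2 (PySem.List.pyGetD w1 p.2 0 + 1)
           else w1) k 0
          = PySem.List.pyGetD w k 0
            + (if k = p.1 then pvG friends gifts p.1 p.2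
               else if k = p.2 then pvG friends gifts p.2 p.1 else 0) := by
      intro w1 hw1len hw1get
      have hb1 : p.1 < (w1.length : Int) := by rw [hw1len]; exact hp1'
      have hb2 : p.2 < (w1.length : Int) := by rw [hw1len]; exact hp2'
      have hG1 : pvG friends gifts p.1 p.2
          = (if (cij > cji ∨ (cij = cji ∧ si > sj)) then 1 else 0) - (if si > sj then 1 else 0) := by
        rw [pvG, pvW, ← hsi, ← hsj, ← hcij, ← hcji]
        by_cases h1 : cij > cji <;> by_cases h2 : cij = cji <;> by_cases h3 : si > sj <;>
          simp [h1, h2, h3]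
      have hG2 : pvG friends gifts p.2 p.1
          = (if (cji > cij ∨ (cji = cij ∧ sj > si)) then 1 else 0) - (if sj > si then 1 else 0) := by
        rw [pvG, pvW, ← hsi, ← hsj, ← hcij, ← hcji]
        by_cases h1 : cji > cij <;> by_cases h2 : cji = cij <;> by_cases h3 : sj > si <;>
          simp [h1, h2, h3]
      by_cases hc1 : cij > cji
      · rw [if_pos hc1, pySetD_shift_getD w1 p.1 k 1 hp1 hb1 hk, hw1get k hk, hG1, hG2]
        split_ifs <;> omega
      · rw [if_neg hc1]
        by_cases hc2 : cji > cij
        · rw [if_pos hc2, pySetD_shift_getD w1 p.2 k 1 hp2 hb2 hk, hw1get k hk, hG1, hG2]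
          split_ifs <;> omega
        · rw [if_neg hc2]
          by_cases hs1 : si > sj
          · rw [if_pos hs1, pySetD_shift_getD w1 p.1 k 1 hp1 hb1 hk, hw1get k hk, hG1, hG2]
            split_ifs <;> omega
          · rw [if_neg hs1]
            by_cases hs2 : sj > si
            · rw [if_pos hs2, pySetD_shift_getD w1 p.2 k 1 hp2 hb2 hk, hw1get k hk, hG1, hG2]
              split_ifs <;> omega
            · rw [if_neg hs2, hw1get k hk, hG1, hG2]
              split_ifs <;> omega
    by_cases hs1 : si > sj
    · rw [if_pos hs1]
      exact main _ (PySem.List.length_pySetD ..)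
        (fun k hk => by
          rw [pySetD_shift_getD w p.1 k (-1) hp1 hp1' hk]
          split_ifs <;> omega)
    · rw [if_neg hs1]
      by_cases hs2 : sj > si
      · rw [if_pos hs2]
        exact main _ (PySem.List.length_pySetD ..)
          (fun k hk => by
            rw [pySetD_shift_getD w p.2 k (-1) hp2 hp2' hk]
            split_ifs <;> omega)
      · rw [if_neg hs2]
        exact main w rfl (fun k hk => by split_ifs <;> omega)

lemma pvFixFold (friends gifts : List String) : ∀ (PL : List (Int × Int)) (w : List Int),
    (∀ p ∈ PL, 0 ≤ p.1 ∧ p.1 < (w.length : Int) ∧ 0 ≤ p.2 ∧ p.2 < (w.length : Int)) →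
    (PL.foldl (pvFixStep friends gifts) w).length = w.length ∧
    ∀ k : Int, 0 ≤ k →
      PySem.List.pyGetD (PL.foldl (pvFixStep friends gifts) w) k 0
        = PySem.List.pyGetD w k 0 + (PL.map (pvDelta friends gifts k)).sum := by
  intro PL
  induction PL with
  | nil => intro w _; exact ⟨rfl, fun k _ => by simp⟩
  | cons p t ih =>
    intro w hb
    obtain ⟨h1, h2, h3, h4⟩ := hb p (by simp)
    have hlen := pvFixStep_len friends gifts w p
    obtain ⟨ihl, ihg⟩ := ih (pvFixStep friends gifts w p)
      (fun q hq => by rw [hlen]; exact hb q (List.mem_cons_of_mem _ hq))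
    refine ⟨by rw [List.foldl_cons, ihl, hlen], ?_⟩
    intro k hk
    rw [List.foldl_cons, ihg k hk, pvFixStep_getD friends gifts w p k h1 h2 h3 h4 hk,
        List.map_cons, List.sum_cons]
    ring

lemma pvC_nonneg (friends gifts : List String) (i j : Int) : 0 ≤ pvC friends gifts i j :=
  Int.natCast_nonneg _

-- summing the repairs over the exchanged-pair set, coordinate-wise over all people
lemma pvDeltaSum (friends gifts : List String) (hpre : Pre_solution friends gifts)
    (k : Int) :
    ((PySem.Set.ofList (pvL friends gifts)).map (pvDelta friends gifts k)).sum
      = ((List.range friends.length).map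
          (fun m : Nat =>
            (if (decide ((m : Int) ≠ k) && pvW friends gifts k (m : Int)) = true then (1 : Int) else 0)
            - (if decide (pvS friends gifts (m : Int) < pvS friends gifts k) = true then (1 : Int) else 0))).sum := by
  set S := PySem.Set.ofList (pvL friends gifts) with hS
  have hnd : S.Nodup := PySem.Set.nodup_ofList _
  have hmemL : ∀ p : Int × Int, p ∈ S ↔ p ∈ pvL friends gifts := fun p =>
    PySem.Set.mem_ofList _ p
  have hmemC : ∀ p : Int × Int, p ∈ S ↔ 0 < pvC friends gifts p.1 p.2 := by
    intro p
    rw [hmemL, pvC]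
    constructor
    · intro h; exact_mod_cast List.count_pos_iff.mpr h
    · intro h; exact List.count_pos_iff.mp (by exact_mod_cast h)
  have hbnd : ∀ p ∈ S, 0 ≤ p.1 ∧ p.1 < (friends.length : Int) ∧ 0 ≤ p.2 ∧ p.2 < (friends.length : Int) :=
    fun p hp => pvL_valid friends gifts hpre p ((hmemL p).mp hp)
  -- split each repair into a giver-side and a receiver-side term
  have hdec : ∀ p ∈ S, pvDelta friends gifts k p
      = (if p.1 = k ∧ (¬ (k = p.2 ∨ (p.2 < k ∧ 0 < pvC friends gifts p.2 k))) then pvG friends gifts k p.2 else 0)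
        + (if p.2 = k ∧ (¬ (p.1 = k ∨ (k < p.1 ∧ 0 < pvC friends gifts k p.1))) then pvG friends gifts k p.1 else 0) := by
    intro p _
    unfold pvDelta
    obtain ⟨i, j⟩ := p
    dsimp only
    by_cases hik : i = k
    · subst hik
      by_cases hskip : i = j ∨ (j < i ∧ 0 < pvC friends gifts j i)
      · simp [hskip]
      · simp [hskip]
    · by_cases hjk : j = k
      · subst hjk
        by_cases hskip : i = j ∨ (j < i ∧ 0 < pvC friends gifts j i)
        · rcases hskip with h | h
          · exact absurd h hik
          · simp [hik, h.1, h.2, not_le.mpr h.2]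
        · have h1 : ¬(j < i ∧ 0 < pvC friends gifts j i) := fun h => hskip (Or.inr h)
          have h2 : ¬(j = i) := fun h => hik h.symm
          simp [hik, h1, h2,
            fun hji : j < i => not_lt.mp (fun hc : 0 < pvC friends gifts j i => h1 ⟨hji, hc⟩)]
      · have e1 : ¬(i = k ∧ ¬(k = j ∨ (j < k ∧ 0 < pvC friends gifts j k))) := fun h => hik h.1
        have e2 : ¬(j = k ∧ ¬(i = k ∨ (k < i ∧ 0 < pvC friends gifts k i))) := fun h => hjk h.1
        rw [if_neg e1, if_neg e2]
        have e3 : ¬(k = i) := fun h => hik h.symm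
        have e4 : ¬(k = j) := fun h => hjk h.symm
        split_ifs <;> simp_all
  rw [List.map_congr_left hdec, PySem.List.sum_map_add_int,
      sum_pairs_fst friends.length k (pvG friends gifts k)
        (fun m => ¬ (k = m ∨ (m < k ∧ 0 < pvC friends gifts m k))) S hnd
        (fun p hp => ⟨(hbnd p hp).2.2.1, (hbnd p hp).2.2.2⟩),
      sum_pairs_snd friends.length k (pvG friends gifts k)
        (fun m => ¬ (m = k ∨ (k < m ∧ 0 < pvC friends gifts k m))) S hnd
        (fun p hp => ⟨(hbnd p hp).1, (hbnd p hp).2.1⟩),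
      ← PySem.List.sum_map_add_int]
  apply congrArg List.sum
  apply List.map_congr_left
  intro m _
  by_cases hmk : (m : Int) = k
  · rw [if_neg (by rintro ⟨-, hq⟩; exact hq (Or.inl hmk.symm)),
        if_neg (by rintro ⟨-, hq⟩; exact hq (Or.inl hmk)),
        if_neg (by simp [hmk]), if_neg (by rw [hmk]; simp)]
    ring
  · have hd1 : decide ((m : Int) ≠ k) = true := by simp [hmk]
    rw [hd1, Bool.true_and]
    by_cases hex : 0 < pvC friends gifts k (m : Int) ∨ 0 < pvC friends gifts (m : Int) k
    · -- an exchanged pair: exactly one of the two terms fires, contributing pvG k m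
      have hval : (if ((k, (m : Int)) ∈ S ∧ ¬ (k = (m : Int) ∨ ((m : Int) < k ∧ 0 < pvC friends gifts (m : Int) k))) then pvG friends gifts k (m : Int) else 0)
          + (if (((m : Int), k) ∈ S ∧ ¬ ((m : Int) = k ∨ (k < (m : Int) ∧ 0 < pvC friends gifts k (m : Int)))) then pvG friends gifts k (m : Int) else 0)
          = pvG friends gifts k (m : Int) := by
        simp only [hmemC]
        rcases lt_trichotomy ((m : Int)) k with hlt | heq | hgt
        · by_cases h2 : 0 < pvC friends gifts (m : Int) k
          · rw [if_neg (by rintro ⟨-, hq⟩; exact hq (Or.inr ⟨hlt, h2⟩)),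
                if_pos ⟨h2, by
                  rintro (h | ⟨h', -⟩)
                  · exact hmk h
                  · omega⟩]
            ring
          · have h1 : 0 < pvC friends gifts k (m : Int) := by tauto
            rw [if_pos ⟨h1, by
                  rintro (h | ⟨-, hb⟩)
                  · exact hmk h.symm
                  · exact h2 hb⟩,
                if_neg (by rintro ⟨hb, -⟩; exact h2 hb)]
            ring
        · exact absurd heq hmk
        · by_cases h1 : 0 < pvC friends gifts k (m : Int)
          · rw [if_pos ⟨h1, by
                  rintro (h | ⟨h', -⟩)
                  · exact hmk h.symm
                  · omega⟩,
                if_neg (by rintro ⟨-, hq⟩; exact hq (Or.inr ⟨hgt, h1⟩))]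
            ring
          · have h2 : 0 < pvC friends gifts (m : Int) k := by tauto
            rw [if_neg (by rintro ⟨ha, -⟩; exact h1 ha),
                if_pos ⟨h2, by
                  rintro (h | ⟨-, ha⟩)
                  · exact hmk h
                  · exact h1 ha⟩]
            ring
      rw [hval, pvG]
      by_cases hs : pvS friends gifts (m : Int) < pvS friends gifts k <;>
        simp [hs, gt_iff_lt]
    · -- no gifts either way: both repairs are 0 and the rank indicator is the win indicator
      have hc1 : pvC friends gifts k (m : Int) = 0 := by
        have := pvC_nonneg friends gifts k (m : Int); omega
      have hc2 : pvC friends gifts (m : Int) k = 0 := by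
        have := pvC_nonneg friends gifts (m : Int) k; omega
      rw [if_neg (by rw [hmemC]; rintro ⟨h, -⟩; simp only [] at h; omega),
          if_neg (by rw [hmemC]; rintro ⟨h, -⟩; simp only [] at h; omega)]
      have hw : pvW friends gifts k (m : Int)
          = decide (pvS friends gifts k > pvS friends gifts (m : Int)) := by
        rw [pvW, hc1, hc2]
        simp
      rw [hw]
      by_cases hs : pvS friends gifts (m : Int) < pvS friends gifts k <;>
        simp [hs, gt_iff_lt]

-- B's value equals the max over pvCnt
lemma pvB_eq (friends gifts : List String) (hpre : Pre_solution friends gifts) :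
    solution_alt friends gifts
      = (PySem.List.pyRange 0 (friends.length : Int)).foldl
          (fun mx i => max mx (pvCnt friends gifts i)) 0 := by
  have hnt : (PySem.List.enumerate friends).foldl (fun d p => d.insert p.2 p.1) PySem.Dict.empty
      = pvNT friends := rfl
  have hval := pvL_valid friends gifts hpre
  simp only [solution_alt]
  rw [hnt]
  -- split the one-pass gift fold into the pair-count fold and the score fold
  have hfold : gifts.foldl
      (fun (st : PySem.Dict (Int × Int) Int × List Int) g =>
        let parts := PySem.Str.split₀ g
        if parts.length = 2 then
          let a := parts.getD 0 ""
          let b := parts.getD 1 ""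
          let i := (pvNT friends).getD a 0
          let j := (pvNT friends).getD b 0
          (st.1.insert (i, j) (st.1.getD (i, j) 0 + 1),
           let s1 := PySem.List.pySetD st.2 i (PySem.List.pyGetD st.2 i 0 + 1)
           PySem.List.pySetD s1 j (PySem.List.pyGetD s1 j 0 - 1))
        else st)
      (PySem.Dict.empty, List.replicate friends.length (0 : Int))
    = ((pvL friends gifts).foldl (fun d p => d.insert p (d.getD p 0 + 1)) PySem.Dict.empty,
       (pvL friends gifts).foldl pvStepS (List.replicate friends.length (0 : Int))) := by
    rw [PySem.List.foldl_congr_mem gifts _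
      (fun (st : PySem.Dict (Int × Int) Int × List Int) g =>
        (st.1.insert (pvPr (pvNT friends) g) (st.1.getD (pvPr (pvNT friends) g) 0 + 1),
         pvStepS st.2 (pvPr (pvNT friends) g))) _ ?hcong]
    case hcong =>
      intro st g hg
      obtain ⟨hlen2, hmem⟩ := hpre g hg
      obtain ⟨a, b, hab⟩ := pvSplit2 g hlen2
      simp [hab, pvPr, pvStepS]
    rw [← List.foldl_map (f := pvPr (pvNT friends))
      (g := fun (st : PySem.Dict (Int × Int) Int × List Int) (p : Int × Int) =>
        (st.1.insert p (st.1.getD p 0 + 1), pvStepS st.2 p))]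
    rw [show gifts.map (pvPr (pvNT friends)) = pvL friends gifts from rfl]
    rw [PySem.List.foldl_prod_mk
      (fun (d : PySem.Dict (Int × Int) Int) (p : Int × Int) => d.insert p (d.getD p 0 + 1))
      pvStepS]
  rw [hfold]
  dsimp only
  set n : Int := (friends.length : Int) with hn
  set L := pvL friends gifts with hL
  set cnt : PySem.Dict (Int × Int) Int := L.foldl (fun d p => d.insert p (d.getD p 0 + 1)) PySem.Dict.empty with hcntdef
  set score := L.foldl pvStepS (List.replicate friends.length (0 : Int)) with hscoredef
  -- pair counts
  have hcnt : ∀ i j : Int, cnt.getD (i, j) 0 = pvC friends gifts i j := by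
    intro i j
    rw [hcntdef, PySem.Dict.getD_foldl_insert_add_one, PySem.Dict.getD_empty, zero_add, pvC, hL]
  have hkeys : cnt.keys = PySem.Set.ofList L := by
    rw [hcntdef, PySem.Dict.keys_foldl_insert, PySem.Dict.keys_empty, PySem.Set.update_nil_left]
  have hcont : ∀ i j : Int, (cnt.contains (i, j) = true) ↔ 0 < pvC friends gifts i j := by
    intro i j
    rw [PySem.Dict.contains_iff_mem_keys, hkeys, PySem.Set.mem_ofList, pvC, hL]
    constructor
    · intro h; exact_mod_cast List.count_pos_iff.mpr h
    · intro h; exact List.count_pos_iff.mp (by exact_mod_cast h)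
  -- the gift-index vector
  obtain ⟨hscorelen, hscoreget'⟩ := pvFoldS_char L (List.replicate friends.length (0 : Int))
    (fun p hp => by
      simp only [List.length_replicate]
      exact hval p hp)
  rw [← hscoredef] at hscorelen hscoreget'
  rw [List.length_replicate] at hscorelen
  have hscoreget : ∀ k : Int, 0 ≤ k → PySem.List.pyGetD score k 0 = pvS friends gifts k := by
    intro k hk
    rw [hscoreget' k hk, pyGetD_replicate0 _ _ hk, pvS, hL]
    ring
  have hscoremap : score = (List.range friends.length).map (fun m : Nat => pvS friends gifts (m : Int)) := by
    apply List.ext_getElem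
    · simp [hscorelen]
    · intro m hm1 hm2
      rw [List.getElem_map, List.getElem_range]
      rw [← List.getD_eq_getElem _ 0 hm1, ← PySem.List.pyGetD_natCast]
      exact hscoreget (m : Int) (by omega)
  -- the rank dictionary gives each person the count of strictly smaller gift indices
  have hfirst : ∀ k : Int, 0 ≤ k → k < n →
      ((PySem.List.enumerate (PySem.List.sorted score (fun x => x) false)).foldl
          (fun (d : PySem.Dict Int Int) p => if d.contains p.2 then d else d.insert p.2 p.1)
          PySem.Dict.empty).getD (PySem.List.pyGetD score k 0) 0
        = ((List.range friends.length).countP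
            (fun m : Nat => decide (pvS friends gifts (m : Int) < pvS friends gifts k)) : Int) := by
    intro k hk0 hk1
    rw [hscoreget k hk0]
    set t := PySem.List.sorted score (fun x => x) false with ht
    have hpair : t.Pairwise (· ≤ ·) := by
      have := PySem.List.sorted_pairwise score (fun x => x)
      simpa using this
    have hmem : pvS friends gifts k ∈ t := by
      rw [ht, PySem.List.mem_sorted, hscoremap]
      exact List.mem_map.mpr ⟨k.toNat, List.mem_range.mpr (by omega), by
        congr 1
        omega⟩
    rw [pvFirstFold t 0 PySem.Dict.empty (pvS friends gifts k) 0,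
        if_neg (by simp [PySem.Dict.contains_empty]), if_pos hmem, zero_add,
        idxOf_sorted_countP t hpair _ hmem,
        List.Perm.countP_eq _ (PySem.List.sorted_perm score (fun x => x) false),
        hscoremap, List.countP_map]
    rfl
  -- the repair sweep
  rw [hkeys]
  have hbndS : ∀ p ∈ PySem.Set.ofList L,
      0 ≤ p.1 ∧ p.1 < n ∧ 0 ≤ p.2 ∧ p.2 < n := by
    intro p hp
    exact hval p ((PySem.Set.mem_ofList L p).mp hp)
  rw [PySem.List.foldl_congr_mem (PySem.Set.ofList L) _ (pvFixStep friends gifts) _ ?hfix]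
  case hfix =>
    intro w p hp
    obtain ⟨hb1, hb2, hb3, hb4⟩ := hbndS p hp
    rw [hcnt p.1 p.2, hcnt p.2 p.1, hscoreget p.1 hb1, hscoreget p.2 hb3]
    unfold pvFixStep
    exact if_congr (or_congr Iff.rfl (and_congr Iff.rfl (hcont p.2 p.1))) rfl rfl
  -- length of the initial win vector
  have hw0len : ((PySem.List.pyRange 0 n).map
      (fun k => ((PySem.List.enumerate (PySem.List.sorted score (fun x => x) false)).foldl
          (fun (d : PySem.Dict Int Int) p => if d.contains p.2 then d else d.insert p.2 p.1)
          PySem.Dict.empty).getD (PySem.List.pyGetD score k 0) 0)).length = friends.length := by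
    rw [List.length_map, hn, PySem.List.pyRange_zero_nat, List.length_map, List.length_range]
  obtain ⟨hwlen, hwget⟩ := pvFixFold friends gifts (PySem.Set.ofList L) _
    (fun p hp => by rw [hw0len]; exact hbndS p hp)
  -- every entry of the final win vector is pvCnt
  have hfin : ∀ k : Int, 0 ≤ k → k < n →
      PySem.List.pyGetD
        ((PySem.Set.ofList L).foldl (pvFixStep friends gifts)
          ((PySem.List.pyRange 0 n).map
            (fun k => ((PySem.List.enumerate (PySem.List.sorted score (fun x => x) false)).foldl
                (fun (d : PySem.Dict Int Int) p => if d.contains p.2 then d else d.insert p.2 p.1)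
                PySem.Dict.empty).getD (PySem.List.pyGetD score k 0) 0))) k 0
        = pvCnt friends gifts k := by
    intro k hk0 hk1
    rw [hwget k hk0,
        PySem.List.pyGetD_map_pyRange_of_nonneg _ n k 0 hk0 hk1,
        hfirst k hk0 hk1, hL, pvDeltaSum friends gifts hpre k]
    rw [show (fun m : Nat =>
          (if (decide ((m : Int) ≠ k) && pvW friends gifts k (m : Int)) = true then (1 : Int) else 0)
          - (if decide (pvS friends gifts (m : Int) < pvS friends gifts k) = true then (1 : Int) else 0))
        = (fun m : Nat =>
          (fun m : Nat => if (decide ((m : Int) ≠ k) && pvW friends gifts k (m : Int)) = true then (1 : Int) else 0) m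
          - (fun m : Nat => if decide (pvS friends gifts (m : Int) < pvS friends gifts k) = true then (1 : Int) else 0) m)
        from rfl,
        sum_map_sub_int, PySem.List.sum_map_ite_one_zero, PySem.List.sum_map_ite_one_zero]
    rw [pvCnt, PySem.List.pyRange_zero_nat, List.countP_map]
    have : (List.range friends.length).countP
          ((fun j => decide (j ≠ k) && pvW friends gifts k j) ∘ fun m : Nat => (m : Int))
        = (List.range friends.length).countP
          (fun m : Nat => decide ((m : Int) ≠ k) && pvW friends gifts k (m : Int)) := rfl
    rw [this]
    ring
  -- the final win vector is the pvCnt table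
  have hlist : (PySem.Set.ofList L).foldl (pvFixStep friends gifts)
        ((PySem.List.pyRange 0 n).map
          (fun k => ((PySem.List.enumerate (PySem.List.sorted score (fun x => x) false)).foldl
              (fun (d : PySem.Dict Int Int) p => if d.contains p.2 then d else d.insert p.2 p.1)
              PySem.Dict.empty).getD (PySem.List.pyGetD score k 0) 0))
      = (List.range friends.length).map (fun m : Nat => pvCnt friends gifts (m : Int)) := by
    apply List.ext_getElem
    · rw [hwlen, hw0len]; simp
    · intro m hm1 hm2
      rw [List.getElem_map, List.getElem_range]
      rw [← List.getD_eq_getElem _ 0 hm1, ← PySem.List.pyGetD_natCast]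
      apply hfin (m : Int) (by omega)
      rw [hwlen, hw0len] at hm1
      rw [hn]
      exact_mod_cast hm1
  rw [hlist, ← foldl_max_zero_eq_maxD _ (fun x hx => by
    obtain ⟨m, hm, rfl⟩ := List.mem_map.mp hx
    exact Int.natCast_nonneg _)]
  rw [List.foldl_map, hn, PySem.List.pyRange_zero_nat, List.foldl_map]

-- ===== VERDICT (by name: the statement is the Claim_ definition above) =====
theorem solution_spec : Claim_equal_solution := by
  intro friends gifts _ hpre
  unfold Spec_solution
  rw [pvA_eq friends gifts hpre, pvB_eq friends gifts hpre]
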